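-- pv_equiv track=rewrite | github.com/Mao-beta/AtCoder | ARC/ARC146/ARC146B.py | adjust
-- ===== SOURCE A (Python) =====
-- def adjust(a, b):
--     if a <= b:
--         return a
--
--     for bi in range(32, -1, -1):
--         if ((a >> bi) & 1) == 1 and ((b >> bi) & 1) == 0:
--             a -= (1 << bi)
--
--         if a <= b:
--             return a
-- ===== SOURCE B (Python) =====
-- def adjust(a, b):
--     if a <= b:
--         return a
--     # highest bit where a and b differ; a has 1 and b has 0 there, so the
--     # answer keeps the common bits above it and reduces the problem below it
--     t = (a ^ b).bit_length() - 1
--     p = 1 << t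
--     return b - b % p + adjust(a % p, b % p)
-- ===== Notes on version B (the rewrite author's own statement) =====
-- stated objective: simpler
-- what changed: Replaces the fixed 33-iteration clear-one-bit-at-a-time loop with a short recursion that jumps straight to the highest differing bit via xor/bit_length, keeps b's bits above it, and recurses on the remainders below it.
-- outside the precondition, e.g. on adjust(0, -1): A returns None, B returns -1
import Mathlib
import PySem

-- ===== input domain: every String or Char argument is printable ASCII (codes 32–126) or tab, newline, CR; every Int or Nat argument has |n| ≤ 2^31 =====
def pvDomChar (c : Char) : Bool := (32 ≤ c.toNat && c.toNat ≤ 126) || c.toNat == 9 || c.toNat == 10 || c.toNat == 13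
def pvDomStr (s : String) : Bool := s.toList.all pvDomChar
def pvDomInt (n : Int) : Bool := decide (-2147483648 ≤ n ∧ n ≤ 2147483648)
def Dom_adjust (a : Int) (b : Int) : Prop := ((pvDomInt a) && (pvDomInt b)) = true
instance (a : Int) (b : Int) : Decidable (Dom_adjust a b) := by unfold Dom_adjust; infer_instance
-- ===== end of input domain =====

-- B replaces A's 33-step clear-one-bit loop by a recursion that jumps to the highest
-- differing bit (xor / bit_length) and recurses on the low remainders ("simpler").

-- ===== PORT A =====
-- the for-loop of A with its early return; `none` = Python falls off the loop (returns None)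
def adjustLoop : List Int → Int → Int → Option Int
  | [], _, _ => none
  | bi :: rest, a, b =>
    let a' := if PySem.Int.band (a >>> bi.toNat) 1 = 1 ∧ PySem.Int.band (b >>> bi.toNat) 1 = 0
              then a - (1 : Int) <<< bi.toNat else a
    if a' ≤ b then some a' else adjustLoop rest a' b

def adjust (a : Int) (b : Int) : Int :=
  if a ≤ b then a
  else (adjustLoop (PySem.List.pyRange 32 (-1) (-1)) a b).getD 0
  -- `.getD 0`: Python returns None there (excluded by Pre_adjust)

-- ===== PORT B =====
-- literal port of Source B; the `bxor a b ≠ 0` guard is a totality guard only: it always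
-- holds under the `¬ a ≤ b` branch
def adjust_alt (a : Int) (b : Int) : Int :=
  if a ≤ b then a
  else if hx : PySem.Int.bxor a b ≠ 0 then
    b - PySem.Int.mod b ((1 : Int) <<< (PySem.Int.bitLength (PySem.Int.bxor a b) - 1)) +
      adjust_alt (PySem.Int.mod a ((1 : Int) <<< (PySem.Int.bitLength (PySem.Int.bxor a b) - 1)))
                 (PySem.Int.mod b ((1 : Int) <<< (PySem.Int.bitLength (PySem.Int.bxor a b) - 1)))
  else 0
termination_by (PySem.Int.bxor a b).natAbs
decreasing_by
  set t := PySem.Int.bitLength (PySem.Int.bxor a b) - 1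
  have hsh : (1:Int) <<< t = ((2^t : Nat) : Int) := by
    rw [Int.shiftLeft_eq]; push_cast; ring
  rw [hsh]
  have hp : (0:Int) < ((2^t : Nat) : Int) := by positivity
  have h1 := PySem.Int.mod_nonneg a hp
  have h2 := PySem.Int.mod_lt a hp
  have h3 := PySem.Int.mod_nonneg b hp
  have h4 := PySem.Int.mod_lt b hp
  rw [PySem.Int.bxor_of_nonneg h1 h3, Int.natAbs_natCast]
  have hle := PySem.Int.two_pow_bitLength_le _ hx
  exact lt_of_lt_of_le (Nat.xor_lt_two_pow (n := t) (by omega) (by omega)) hle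

-- ===== PRECONDITION & SPEC =====
-- Pre_ excludes exactly the inputs with a ≥ 0 > b: there A's loop never brings a below b,
-- Python falls off the loop and returns None (no int value).
def Pre_adjust (a : Int) (b : Int) : Prop := a < 0 ∨ 0 ≤ b
instance (a : Int) (b : Int) : Decidable (Pre_adjust a b) := by unfold Pre_adjust; infer_instance
def pvWitness_adjust : Int × Int := (5, 2)

def Spec_adjust (a : Int) (b : Int) (out : Int) : Prop := out = adjust_alt a b
instance (a : Int) (b : Int) (out : Int) : Decidable (Spec_adjust a b out) := by unfold Spec_adjust; infer_instance

-- ===== CLAIM (what is proved, stated in full; the proofs are below) =====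
def Claim_equal_adjust : Prop := ∀ (a : Int) (b : Int), Dom_adjust a b → Pre_adjust a b → Spec_adjust a b (adjust a b)

-- ===== LEMMAS AND PROOFS =====

-- xor ignores a common high part that is a multiple of 2^n sitting above both low parts
theorem pv_xor_translate (n m u v : Nat) (hu : u < 2^n) (hv : v < 2^n) :
    (2^n * m + u) ^^^ (2^n * m + v) = u ^^^ v := by
  apply Nat.eq_of_testBit_eq
  intro i
  rw [Nat.testBit_xor, Nat.testBit_two_pow_mul_add _ hu, Nat.testBit_two_pow_mul_add _ hv,
    Nat.testBit_xor]
  by_cases h : i < n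
  · simp [h]
  · rw [if_neg h, if_neg h, Bool.xor_self]
    have hf : (u ^^^ v).testBit i = false :=
      Nat.testBit_lt_two_pow (lt_of_lt_of_le (Nat.xor_lt_two_pow hu hv)
        (Nat.pow_le_pow_right (by norm_num) (by omega)))
    rw [← Nat.testBit_xor, hf]

theorem pv_testBit_compl (n i u : Nat) (hu : u < 2^n) (hi : i < n) :
    (2^n - 1 - u).testBit i = !u.testBit i := by
  have hP : 0 < 2^i := Nat.two_pow_pos i
  have hPQ : 2^n = 2^i * 2^(n-i) := by rw [← pow_add]; congr 1; omega
  have hq : u / 2^i < 2^(n-i) := by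
    rw [Nat.div_lt_iff_lt_mul hP]
    calc u < 2^n := hu
      _ = 2^i * 2^(n-i) := hPQ
      _ = 2^(n-i) * 2^i := mul_comm _ _
  have hr : u % 2^i < 2^i := Nat.mod_lt _ hP
  have hdm := Nat.div_add_mod u (2^i)
  have hsplit : ((2^(n-i) - 1 - u / 2^i) + (u / 2^i) + 1) = 2^(n-i) := by omega
  have hA : 2^i * (2^(n-i) - 1 - u / 2^i) + 2^i * (u / 2^i) + 2^i = 2^i * 2^(n-i) := by
    calc 2^i * (2^(n-i) - 1 - u / 2^i) + 2^i * (u / 2^i) + 2^i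
        = 2^i * ((2^(n-i) - 1 - u / 2^i) + (u / 2^i) + 1) := by ring
      _ = 2^i * 2^(n-i) := by rw [hsplit]
  have h1 : 2^n - 1 - u = 2^i * (2^(n-i) - 1 - u / 2^i) + (2^i - 1 - u % 2^i) := by
    set X := 2^i * (2^(n-i) - 1 - u / 2^i)
    set Y := 2^i * (u / 2^i)
    set Z := 2^i * 2^(n-i)
    omega
  have key : (2^n - 1 - u) / 2^i = 2^(n-i) - 1 - u / 2^i := by
    rw [h1, Nat.mul_add_div hP,
      Nat.div_eq_of_lt (show 2^i - 1 - u % 2^i < 2^i by omega)]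
    omega
  have hQ2 : 2^(n-i) % 2 = 0 := by
    have h' : n - i = (n - i - 1) + 1 := by omega
    rw [h', pow_succ, Nat.mul_mod_left]
  rw [Nat.testBit_eq_decide_div_mod_eq, Nat.testBit_eq_decide_div_mod_eq, key]
  have hpar : (2^(n-i) - 1 - u / 2^i) % 2 = 1 - u / 2^i % 2 := by omega
  rw [hpar]
  by_cases hm : u / 2^i % 2 = 1
  · simp [hm]
  · have h0 : u / 2^i % 2 = 0 := by omega
    simp [h0]

theorem pv_xor_compl (n u v : Nat) (hu : u < 2^n) (hv : v < 2^n) :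
    (2^n - 1 - u) ^^^ (2^n - 1 - v) = u ^^^ v := by
  apply Nat.eq_of_testBit_eq
  intro i
  by_cases hi : i < n
  · rw [Nat.testBit_xor, Nat.testBit_xor, pv_testBit_compl n i u hu hi,
      pv_testBit_compl n i v hv hi]
    cases u.testBit i <;> cases v.testBit i <;> rfl
  · have h1 : ((2^n - 1 - u) ^^^ (2^n - 1 - v)).testBit i = false :=
      Nat.testBit_lt_two_pow (lt_of_lt_of_le (Nat.xor_lt_two_pow (n := n) (by omega) (by omega))
        (Nat.pow_le_pow_right (by norm_num) (by omega)))
    have h2 : (u ^^^ v).testBit i = false :=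
      Nat.testBit_lt_two_pow (lt_of_lt_of_le (Nat.xor_lt_two_pow hu hv)
        (Nat.pow_le_pow_right (by norm_num) (by omega)))
    rw [h1, h2]

theorem pv_bxor_translate (n : Nat) (D u v : Int) (hD : ((2^n : Nat) : Int) ∣ D)
    (hu0 : 0 ≤ u) (hu : u < ((2^n : Nat) : Int)) (hv0 : 0 ≤ v) (hv : v < ((2^n : Nat) : Int)) :
    PySem.Int.bxor (D + u) (D + v) = PySem.Int.bxor u v := by
  obtain ⟨c, hc⟩ := hD
  rcases lt_trichotomy c 0 with hcneg | hc0 | hcpos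
  · -- D ≤ -2^n : both sums are negative
    have hDle : D ≤ -((2^n : Nat) : Int) := by
      rw [hc]
      have h1 : c ≤ -1 := by omega
      have := mul_le_mul_of_nonneg_left h1 (le_of_lt (show (0:Int) < ((2^n:Nat):Int) by positivity))
      omega
    have hau : D + u < 0 := by omega
    have hav : D + v < 0 := by omega
    have hm' : (0:Int) ≤ -c - 1 := by omega
    have hE : -D - ((2^n : Nat) : Int) = ((2^n * (-c - 1).toNat : Nat) : Int) := by
      rw [hc]; push_cast [Int.toNat_of_nonneg hm']; ring
    simp only [PySem.Int.bxor]
    rw [if_neg (not_le.mpr hau), if_neg (not_le.mpr hav), if_pos hu0, if_pos hv0]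
    have e1 : (-(D + u) - 1).toNat = 2^n * (-c - 1).toNat + (2^n - 1 - u.toNat) := by omega
    have e2 : (-(D + v) - 1).toNat = 2^n * (-c - 1).toNat + (2^n - 1 - v.toNat) := by omega
    rw [e1, e2, pv_xor_translate n _ _ _ (by omega) (by omega),
      pv_xor_compl n _ _ (by omega) (by omega)]
  · rw [hc, hc0, mul_zero, zero_add, zero_add]
  · -- D ≥ 2^n : both sums are nonnegative
    have hDpos : ((2^n : Nat) : Int) ≤ D := by
      rw [hc]
      have h1 : (1:Int) ≤ c := by omega
      nlinarith [show (0:Int) < ((2^n:Nat):Int) by positivity]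
    have hD' : D = ((2^n * c.toNat : Nat) : Int) := by
      rw [hc]; push_cast [Int.toNat_of_nonneg (le_of_lt hcpos)]; ring
    rw [PySem.Int.bxor_of_nonneg (by omega) (by omega), PySem.Int.bxor_of_nonneg hu0 hv0]
    have e1 : (D + u).toNat = 2^n * c.toNat + u.toNat := by omega
    have e2 : (D + v).toNat = 2^n * c.toNat + v.toNat := by omega
    rw [e1, e2, pv_xor_translate n _ _ _ (by omega) (by omega)]

theorem pv_bitLength_eq (x : Int) (k : Nat) (h1 : 2^k ≤ x.natAbs) (h2 : x.natAbs < 2^(k+1)) :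
    PySem.Int.bitLength x = k + 1 := by
  have hpos : 0 < (2:Nat)^k := Nat.two_pow_pos k
  have h0 : x ≠ 0 := by
    intro h; rw [h] at h1; simp at h1
  have hle := PySem.Int.two_pow_bitLength_le x h0
  have hlt := PySem.Int.lt_two_pow_bitLength x
  have hk : k < PySem.Int.bitLength x := by
    by_contra h
    have : (2:Nat) ^ PySem.Int.bitLength x ≤ 2 ^ k :=
      Nat.pow_le_pow_right (by norm_num) (by omega)
    omega
  have hk2 : PySem.Int.bitLength x - 1 < k + 1 := by
    have := lt_of_le_of_lt hle h2
    exact (Nat.pow_lt_pow_iff_right (by norm_num)).mp this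
  omega

theorem pv_one_shiftLeft (t : Nat) : (1:Int) <<< t = ((2^t : Nat) : Int) := by
  rw [Int.shiftLeft_eq]; push_cast; ring

theorem pv_mod_translate (p D u : Int) (hp : 0 < p) (hD : p ∣ D) :
    PySem.Int.mod (D + u) p = PySem.Int.mod u p := by
  obtain ⟨c, rfl⟩ := hD
  rw [PySem.Int.mod_eq_emod_of_pos hp, PySem.Int.mod_eq_emod_of_pos hp, add_comm,
    Int.add_mul_emod_self_left]

theorem pv_bxor_ne_zero (u v : Int) (hu0 : 0 ≤ u) (hv0 : 0 ≤ v) (huv : u ≠ v) :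
    PySem.Int.bxor u v ≠ 0 := by
  rw [PySem.Int.bxor_of_nonneg hu0 hv0]
  intro h
  have : u.toNat ^^^ v.toNat = 0 := by omega
  have := Nat.xor_eq_zero_iff.mp this
  omega

theorem pv_bitLength_le (u v : Int) (n : Nat) (hu0 : 0 ≤ u) (hu : u < ((2^n : Nat) : Int))
    (hv0 : 0 ≤ v) (hv : v < ((2^n : Nat) : Int)) :
    PySem.Int.bitLength (PySem.Int.bxor u v) - 1 ≤ n := by
  have hx : (PySem.Int.bxor u v).natAbs < 2^n := by
    rw [PySem.Int.bxor_of_nonneg hu0 hv0, Int.natAbs_natCast]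
    exact Nat.xor_lt_two_pow (by omega) (by omega)
  by_cases h0 : PySem.Int.bxor u v = 0
  · rw [h0]; simp [PySem.Int.bitLength_zero]
  · have := PySem.Int.two_pow_bitLength_le _ h0
    by_contra h
    have : (2:Nat)^n < 2 ^ (PySem.Int.bitLength (PySem.Int.bxor u v) - 1) :=
      Nat.pow_lt_pow_right (by norm_num) (by omega)
    omega

-- B's recursion ignores a common high part that is a multiple of 2^n
theorem pv_alt_translate (n : Nat) (D u v : Int) (hD : ((2^n : Nat) : Int) ∣ D)
    (hu0 : 0 ≤ u) (hu : u < ((2^n : Nat) : Int)) (hv0 : 0 ≤ v) (hv : v < ((2^n : Nat) : Int)) :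
    adjust_alt (D + u) (D + v) = D + adjust_alt u v := by
  by_cases huv : u ≤ v
  · conv_lhs => rw [adjust_alt]
    conv_rhs => rw [adjust_alt]
    rw [if_pos (by omega : D + u ≤ D + v), if_pos huv]
  · have hxeq := pv_bxor_translate n D u v hD hu0 hu hv0 hv
    have hxne : PySem.Int.bxor u v ≠ 0 := pv_bxor_ne_zero u v hu0 hv0 (by omega)
    have ht := pv_bitLength_le u v n hu0 hu hv0 hv
    have hp : (0:Int) < (1:Int) <<< (PySem.Int.bitLength (PySem.Int.bxor u v) - 1) := by
      rw [Int.shiftLeft_eq]; positivity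
    have hpD : ((1:Int) <<< (PySem.Int.bitLength (PySem.Int.bxor u v) - 1)) ∣ D := by
      rw [pv_one_shiftLeft]
      exact dvd_trans (Int.natCast_dvd_natCast.mpr (pow_dvd_pow 2 ht)) hD
    conv_lhs => rw [adjust_alt]
    rw [if_neg (by omega : ¬ D + u ≤ D + v), hxeq, dif_pos hxne,
      pv_mod_translate _ D u hp hpD, pv_mod_translate _ D v hp hpD]
    conv_rhs => rw [adjust_alt]
    rw [if_neg huv, dif_pos hxne]
    ring

theorem pv_band_shift_natCast (A k : Nat) :
    PySem.Int.band ((A : Int) >>> k) 1 = ((A / 2^k % 2 : Nat) : Int) := by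
  rw [Int.shiftRight_eq_div_pow, ← Int.natCast_ediv,
    show ((1:Int)) = ((1:Nat):Int) by simp, PySem.Int.band_natCast, Nat.and_one_is_mod]

theorem pv_band_shift_translate (k : Nat) (D u : Int) (hD : ((2^(k+1) : Nat) : Int) ∣ D) :
    PySem.Int.band ((D + u) >>> k) 1 = PySem.Int.band (u >>> k) 1 := by
  obtain ⟨c, hc⟩ := hD
  have hk0 : ((2^k : Nat) : Int) ≠ 0 := by positivity
  have e1 : (D + u) >>> k = u >>> k + 2 * c := by
    rw [Int.shiftRight_eq_div_pow, Int.shiftRight_eq_div_pow]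
    have h2 : D + u = u + ((2^k : Nat) : Int) * (2 * c) := by rw [hc]; push_cast; ring
    rw [h2, Int.add_mul_ediv_left _ _ hk0]
  rw [e1, PySem.Int.band_one, PySem.Int.band_one,
    PySem.Int.mod_eq_emod_of_pos (by norm_num), PySem.Int.mod_eq_emod_of_pos (by norm_num),
    Int.add_mul_emod_self_left]

-- single step of the loop at the highest differing bit K of A and B (in the Nat world)
theorem pv_loop_step (K : Nat) (A B : Nat) (hAB : B < A)
    (hlo : 2^K ≤ A ^^^ B) (hhi : A ^^^ B < 2^(K+1))
    (tail_ih : ∀ A' B' : Nat, B' < A' → A' ^^^ B' < 2^K →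
      adjustLoop (PySem.List.pyRange ((K : Int) - 1) (-1) (-1)) (A' : Int) (B' : Int)
        = some (adjust_alt (A' : Int) (B' : Int))) :
    adjustLoop (PySem.List.pyRange (K : Int) (-1) (-1)) (A : Int) (B : Int)
      = some (adjust_alt (A : Int) (B : Int)) := by
  have hPpos : 0 < (2:Nat)^K := Nat.two_pow_pos K
  -- high parts agree
  have hdiv : A / 2 ^ (K+1) = B / 2 ^ (K+1) := by
    have h0 : (A ^^^ B) / 2^(K+1) = 0 := Nat.div_eq_of_lt hhi
    have hd := Nat.shiftRight_xor_distrib (a := A) (b := B) (i := K+1)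
    rw [Nat.shiftRight_eq_div_pow, Nat.shiftRight_eq_div_pow, Nat.shiftRight_eq_div_pow] at hd
    rw [h0] at hd
    exact Nat.xor_eq_zero_iff.mp hd.symm
  -- the two bits at K differ
  have hx1 : (A ^^^ B) / 2^K = 1 := by
    have h2 : (A ^^^ B) / 2^K < 2 := by
      rw [Nat.div_lt_iff_lt_mul hPpos]; rw [pow_succ] at hhi; omega
    have h1 : 1 ≤ (A ^^^ B) / 2^K := (Nat.one_le_div_iff hPpos).mpr hlo
    omega
  have hbits : A / 2^K % 2 + B / 2^K % 2 = 1 := by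
    have hxorbit : (A ^^^ B).testBit K = true := by
      rw [Nat.testBit_eq_decide_div_mod_eq, hx1]
      decide
    rw [Nat.testBit_xor, Nat.testBit_eq_decide_div_mod_eq, Nat.testBit_eq_decide_div_mod_eq]
      at hxorbit
    by_cases h1 : A / 2^K % 2 = 1 <;> by_cases h2 : B / 2^K % 2 = 1 <;>
      simp [h1, h2] at hxorbit <;> omega
  -- decompositions
  have eA1 := (Nat.div_add_mod A (2^(K+1))).symm
  have eA2 : A % 2^(K+1) = A % 2^K + 2^K * (A / 2^K % 2) := Nat.mod_pow_succ
  have eB1 := (Nat.div_add_mod B (2^(K+1))).symm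
  have eB2 : B % 2^(K+1) = B % 2^K + 2^K * (B / 2^K % 2) := Nat.mod_pow_succ
  have hmA : A % 2^K < 2^K := Nat.mod_lt _ hPpos
  have hmB : B % 2^K < 2^K := Nat.mod_lt _ hPpos
  have hc : 2^(K+1) * (A / 2^(K+1)) = 2^(K+1) * (B / 2^(K+1)) := by rw [hdiv]
  -- A carries bit K, B does not
  have hbit : A / 2^K % 2 = 1 ∧ B / 2^K % 2 = 0 := by
    rcases (by omega : A / 2^K % 2 = 1 ∧ B / 2^K % 2 = 0 ∨ A / 2^K % 2 = 0 ∧ B / 2^K % 2 = 1)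
      with h | h
    · exact h
    · exfalso
      have e3 : 2^K * (A / 2^K % 2) = 0 := by rw [h.1]; ring
      have e4 : 2^K * (B / 2^K % 2) = 2^K := by rw [h.2]; ring
      omega
  obtain ⟨hbitA, hbitB⟩ := hbit
  have e3 : 2^K * (A / 2^K % 2) = 2^K := by rw [hbitA]; ring
  have e4 : 2^K * (B / 2^K % 2) = 0 := by rw [hbitB]; ring
  have hHH : 2^(K+1) * (B / 2^(K+1)) = 2^K * (2 * (B / 2^(K+1))) := by ring
  have eA : A = 2^(K+1) * (B / 2^(K+1)) + 2^K + A % 2^K := by omega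
  have eB : B = 2^(K+1) * (B / 2^(K+1)) + B % 2^K := by omega
  have h2KA : 2^K ≤ A := by omega
  -- unfold one loop step
  rw [PySem.List.pyRange_neg_one_cons (by omega : (-1:Int) < (K:Int))]
  simp only [adjustLoop, Int.toNat_natCast]
  rw [pv_band_shift_natCast A K, pv_band_shift_natCast B K]
  rw [if_pos (⟨by exact_mod_cast hbitA, by exact_mod_cast hbitB⟩ :
    ((A / 2^K % 2 : Nat) : Int) = 1 ∧ ((B / 2^K % 2 : Nat) : Int) = 0)]
  have ha' : (A : Int) - (1:Int) <<< K = ((A - 2^K : Nat) : Int) := by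
    rw [pv_one_shiftLeft]; push_cast [h2KA]; ring
  rw [ha']
  -- unfold adjust_alt once on (A, B)
  have hxne : PySem.Int.bxor (A:Int) (B:Int) ≠ 0 :=
    pv_bxor_ne_zero _ _ (by positivity) (by positivity) (by exact_mod_cast (by omega : A ≠ B))
  have hbl : PySem.Int.bitLength (PySem.Int.bxor (A:Int) (B:Int)) = K + 1 := by
    rw [PySem.Int.bxor_natCast]
    exact pv_bitLength_eq _ K (by rw [Int.natAbs_natCast]; exact hlo)
      (by rw [Int.natAbs_natCast]; exact hhi)
  have halt : adjust_alt (A:Int) (B:Int)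
      = (B:Int) - ((B % 2^K : Nat) : Int)
        + adjust_alt ((A % 2^K : Nat) : Int) ((B % 2^K : Nat) : Int) := by
    conv_lhs => rw [adjust_alt]
    rw [if_neg (by exact_mod_cast (by omega : ¬ A ≤ B)), dif_pos hxne, hbl]
    have ht0 : K + 1 - 1 = K := rfl
    rw [ht0, pv_one_shiftLeft K, PySem.Int.mod_natCast, PySem.Int.mod_natCast]
  by_cases hle : A % 2^K ≤ B % 2^K
  · -- the subtraction already brings a below b: early return
    rw [if_pos (show ((A - 2^K:Nat):Int) ≤ (B:Int) by exact_mod_cast (by omega : A - 2^K ≤ B))]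
    have hinner : adjust_alt ((A % 2^K : Nat):Int) ((B % 2^K:Nat):Int) = ((A % 2^K:Nat):Int) := by
      conv_lhs => rw [adjust_alt]
      rw [if_pos (by exact_mod_cast hle)]
    rw [halt, hinner]
    congr 1
    omega
  · -- still above b: the loop continues on the low bits
    rw [if_neg (show ¬ ((A - 2^K:Nat):Int) ≤ (B:Int) by exact_mod_cast (by omega : ¬ A - 2^K ≤ B))]
    have hxor'eq : (A - 2^K) ^^^ B = (A % 2^K) ^^^ (B % 2^K) := by
      have e1 : A - 2^K = 2^K * (2 * (B / 2^(K+1))) + A % 2^K := by omega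
      have e2 : B = 2^K * (2 * (B / 2^(K+1))) + B % 2^K := by omega
      calc (A - 2^K) ^^^ B
          = (2^K * (2 * (B / 2^(K+1))) + A % 2^K) ^^^ (2^K * (2 * (B / 2^(K+1))) + B % 2^K) := by
            rw [← e1, ← e2]
        _ = (A % 2^K) ^^^ (B % 2^K) := pv_xor_translate _ _ _ _ hmA hmB
    have hxor' : (A - 2^K) ^^^ B < 2^K := by
      rw [hxor'eq]
      exact Nat.xor_lt_two_pow hmA hmB
    rw [tail_ih (A - 2^K) B (by omega) hxor']
    rw [halt]
    have hD : ((2^K:Nat):Int) ∣ ((2^(K+1) * (B / 2^(K+1)) : Nat):Int) :=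
      Int.natCast_dvd_natCast.mpr ⟨2 * (B / 2^(K+1)), by ring⟩
    have e5 : ((A - 2^K : Nat):Int)
        = ((2^(K+1) * (B / 2^(K+1)) : Nat):Int) + ((A % 2^K : Nat):Int) := by omega
    have e6 : ((B : Nat):Int)
        = ((2^(K+1) * (B / 2^(K+1)) : Nat):Int) + ((B % 2^K : Nat):Int) := by omega
    have e7 : ((2^(K+1) * (B / 2^(K+1)) : Nat):Int) = ((B:Nat):Int) - ((B % 2^K : Nat):Int) := by
      omega
    congr 1
    conv_lhs => rw [e5, e6]
    rw [pv_alt_translate K _ _ _ hD (by positivity) (by exact_mod_cast hmA)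
      (by positivity) (by exact_mod_cast hmB), e7]

theorem pv_loop_eq : ∀ (k : Nat) (A B : Nat), B < A → A ^^^ B < 2^(k+1) →
    adjustLoop (PySem.List.pyRange (k : Int) (-1) (-1)) (A : Int) (B : Int)
      = some (adjust_alt (A : Int) (B : Int)) := by
  intro k
  induction k with
  | zero =>
    intro A B hAB hlt
    have h0 : A ^^^ B ≠ 0 := fun h => by have := Nat.xor_eq_zero_iff.mp h; omega
    refine pv_loop_step 0 A B hAB (by omega) hlt ?_
    intro A' B' h1 h2
    have h0' : A' ^^^ B' ≠ 0 := fun h => by have := Nat.xor_eq_zero_iff.mp h; omega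
    exact absurd h2 (by omega)
  | succ k ih =>
    intro A B hAB hlt
    have hs : ((k+1:Nat):Int) - 1 = ((k:Nat):Int) := by push_cast; ring
    by_cases hx : A ^^^ B < 2^(k+1)
    · -- the bits at k+1 agree: this step does nothing
      have hbit : A / 2^(k+1) % 2 = B / 2^(k+1) % 2 := by
        have hfalse : (A ^^^ B).testBit (k+1) = false := Nat.testBit_lt_two_pow hx
        rw [Nat.testBit_xor, Nat.testBit_eq_decide_div_mod_eq,
          Nat.testBit_eq_decide_div_mod_eq] at hfalse
        by_cases h1 : A / 2^(k+1) % 2 = 1 <;> by_cases h2 : B / 2^(k+1) % 2 = 1 <;>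
          simp [h1, h2] at hfalse <;> omega
      rw [PySem.List.pyRange_neg_one_cons (by omega : (-1:Int) < ((k+1:Nat):Int))]
      simp only [adjustLoop, Int.toNat_natCast]
      rw [pv_band_shift_natCast A (k+1), pv_band_shift_natCast B (k+1)]
      rw [if_neg (show ¬ (((A / 2^(k+1) % 2 : Nat) : Int) = 1 ∧ ((B / 2^(k+1) % 2 : Nat) : Int) = 0) by
        rintro ⟨c1, c2⟩
        have d1 : A / 2^(k+1) % 2 = 1 := by exact_mod_cast c1
        have d2 : B / 2^(k+1) % 2 = 0 := by exact_mod_cast c2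
        omega)]
      rw [if_neg (show ¬ (A:Int) ≤ (B:Int) by exact_mod_cast Nat.not_le.mpr hAB)]
      rw [hs]
      exact ih A B hAB hx
    · refine pv_loop_step (k+1) A B hAB (by omega) hlt ?_
      intro A' B' h1 h2
      rw [hs]
      exact ih A' B' h1 h2

-- A's loop commutes with adding a common multiple of 2^33 (bits 0..32 untouched)
theorem pv_loop_translate : ∀ (l : List Int), (∀ bi ∈ l, (0:Int) ≤ bi ∧ bi ≤ 32) →
    ∀ (u v D : Int), ((2^33 : Nat) : Int) ∣ D →
    adjustLoop l (D + u) (D + v) = (adjustLoop l u v).map (fun r => D + r) := by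
  intro l
  induction l with
  | nil => intro _ u v D _; rfl
  | cons bi rest ih =>
    intro hl u v D hD
    obtain ⟨hbi0, hbi32⟩ := hl bi (List.mem_cons_self ..)
    have hdvd : ((2^(bi.toNat+1) : Nat) : Int) ∣ D :=
      dvd_trans (Int.natCast_dvd_natCast.mpr (pow_dvd_pow 2 (by omega))) hD
    simp only [adjustLoop]
    rw [pv_band_shift_translate bi.toNat D u hdvd, pv_band_shift_translate bi.toNat D v hdvd]
    have hshift : (D + u) - (1:Int) <<< bi.toNat = D + (u - (1:Int) <<< bi.toNat) := by ring
    by_cases hc : PySem.Int.band (u >>> bi.toNat) 1 = 1 ∧ PySem.Int.band (v >>> bi.toNat) 1 = 0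
    · rw [if_pos hc, if_pos hc, hshift]
      by_cases h2 : u - (1:Int) <<< bi.toNat ≤ v
      · rw [if_pos (by omega), if_pos h2]; rfl
      · rw [if_neg (by omega), if_neg h2]
        exact ih (fun x hx => hl x (List.mem_cons_of_mem _ hx)) _ v D hD
    · rw [if_neg hc, if_neg hc]
      by_cases h2 : u ≤ v
      · rw [if_pos (by omega), if_pos h2]; rfl
      · rw [if_neg (by omega), if_neg h2]
        exact ih (fun x hx => hl x (List.mem_cons_of_mem _ hx)) u v D hD

-- ===== VERDICT (by name: the statement is the Claim_ definition above) =====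
theorem adjust_spec : Claim_equal_adjust := by
  unfold Claim_equal_adjust
  intro a b hdom hpre
  unfold Spec_adjust
  simp only [Dom_adjust, pvDomInt, Bool.and_eq_true, decide_eq_true_eq] at hdom
  obtain ⟨⟨ha1, ha2⟩, hb1, hb2⟩ := hdom
  by_cases hab : a ≤ b
  · conv_rhs => rw [adjust_alt]
    unfold adjust
    rw [if_pos hab, if_pos hab]
  · have hml : ∀ bi ∈ PySem.List.pyRange 32 (-1) (-1), (0:Int) ≤ bi ∧ bi ≤ 32 := by
      intro bi h
      rw [PySem.List.mem_pyRange_neg_one] at h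
      omega
    unfold adjust
    rw [if_neg hab]
    rcases hpre with hneg | hpos
    · -- both negative: shift everything up by 2^33
      have hdd : ((2^33 : Nat) : Int) ∣ (-8589934592 : Int) := ⟨-1, by norm_num⟩
      have hu : a = (-8589934592 : Int) + ((a + 8589934592).toNat : Int) := by omega
      have hv : b = (-8589934592 : Int) + ((b + 8589934592).toNat : Int) := by omega
      have hU33 : (a + 8589934592).toNat < 2^33 := by omega
      have hV33 : (b + 8589934592).toNat < 2^33 := by omega
      rw [hu, hv]
      rw [pv_loop_translate _ hml _ _ (-8589934592 : Int) hdd]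
      have hloop := pv_loop_eq 32 (a + 8589934592).toNat (b + 8589934592).toNat (by omega)
        (Nat.xor_lt_two_pow (n := 33) hU33 hV33)
      simp only [Nat.cast_ofNat] at hloop
      rw [hloop]
      simp only [Option.map_some, Option.getD_some]
      rw [pv_alt_translate 33 (-8589934592 : Int) _ _ hdd (by positivity)
        (by exact_mod_cast hU33) (by positivity) (by exact_mod_cast hV33)]
    · -- both nonnegative
      have ha0 : 0 ≤ a := by omega
      have hA : a = ((a.toNat : Nat) : Int) := (Int.toNat_of_nonneg ha0).symm
      have hB : b = ((b.toNat : Nat) : Int) := (Int.toNat_of_nonneg hpos).symm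
      have hU33 : a.toNat < 2^33 := by omega
      have hV33 : b.toNat < 2^33 := by omega
      rw [hA, hB]
      have hloop := pv_loop_eq 32 a.toNat b.toNat (by omega)
        (Nat.xor_lt_two_pow (n := 33) hU33 hV33)
      simp only [Nat.cast_ofNat] at hloop
      rw [hloop]
      simp only [Option.getD_some]
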